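-- pv_equiv track=rewrite | github.com/avradri/emo-core-v1 | emo/twin_hooks/destine.py | _select_asset_href
-- ===== SOURCE A (Python) =====
-- from typing import Any, Dict, Iterable, List, Optional, Tuple
--
-- def _select_asset_href(assets: Dict[str, str], preferred_key: Optional[str]) -> Optional[str]:
--     """
--     Pick an asset href from the STAC "assets" map using light heuristics.
--     """
--     if not assets:
--         return None
--     if preferred_key and preferred_key in assets:
--         return assets[preferred_key]
--     # Prefer commonly used keys
--     for key in ("data", "default", "asset"):
--         if key in assets:
--             return assets[key]
--     # Fallback: first asset
--     for _, href in assets.items():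
--         return href
--     return None
-- ===== SOURCE B (Python) =====
-- def _select_asset_href(assets, preferred_key):
--     # Single pass: score every key once and keep the best-scoring asset seen,
--     # instead of probing the dict with a sequence of candidate lookups.
--     rank = {"data": 1, "default": 2, "asset": 3}
--     if preferred_key:
--         rank[preferred_key] = 0
--     best_rank = 4
--     best_href = None
--     first_href = None
--     for key, href in assets.items():
--         if first_href is None:
--             first_href = href
--         r = rank.get(key, 4)
--         if r < best_rank:
--             best_rank = r
--             best_href = href
--     return best_href if best_rank < 4 else first_href
-- ===== Notes on version B (the rewrite author's own statement) =====
-- stated objective: alternative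
-- what changed: Replaces A's sequence of candidate dict lookups (preferred guard, then data/default/asset probes, then a first-item loop) with a single scan over the items that scores each key via a precomputed rank table (preferred=0, data=1, default=2, asset=3, other=4) and keeps the best-ranked href plus the first href as fallback.
import Mathlib
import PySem

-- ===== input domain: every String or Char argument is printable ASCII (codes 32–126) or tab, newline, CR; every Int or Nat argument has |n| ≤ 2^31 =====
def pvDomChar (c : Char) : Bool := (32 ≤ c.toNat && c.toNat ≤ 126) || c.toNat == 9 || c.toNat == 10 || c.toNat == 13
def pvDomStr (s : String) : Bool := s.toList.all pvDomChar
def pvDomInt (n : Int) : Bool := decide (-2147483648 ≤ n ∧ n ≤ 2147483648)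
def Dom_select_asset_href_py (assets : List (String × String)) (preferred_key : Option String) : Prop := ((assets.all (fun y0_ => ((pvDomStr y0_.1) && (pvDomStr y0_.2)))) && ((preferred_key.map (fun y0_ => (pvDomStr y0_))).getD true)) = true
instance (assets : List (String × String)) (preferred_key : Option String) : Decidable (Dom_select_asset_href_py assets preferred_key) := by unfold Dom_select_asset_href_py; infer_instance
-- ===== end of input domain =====

-- B replaces A's sequence of candidate lookups by one scan over the items keeping the best-ranked href (alternative algorithm; same cost).


-- ===== PORT A =====
-- "for _, href in assets.items(): return href" followed by "return None"
def pvFirstHrefA (assets : List (String × String)) : Option String :=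
  match (PySem.Dict.mk assets).items with
  | [] => none
  | (_, href) :: _ => some href

-- "for key in ("data","default","asset"): if key in assets: return assets[key]" then the fallback
def pvCommonA (assets : List (String × String)) : List String → Option String
  | [] => pvFirstHrefA assets
  | k :: rest =>
    match (PySem.Dict.mk assets).get? k with
    | some v => some v
    | none => pvCommonA assets rest

def select_asset_href_py (assets : List (String × String)) (preferred_key : Option String) : Option String :=
  if assets.isEmpty then none
  else
    match preferred_key with
    | some k =>
      if (k != "") && ((PySem.Dict.mk assets).get? k).isSome then
        (PySem.Dict.mk assets).get? k
      else pvCommonA assets ["data", "default", "asset"]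
    | none => pvCommonA assets ["data", "default", "asset"]

-- ===== PORT B =====
-- rank = {"data":1,"default":2,"asset":3}; if preferred_key: rank[preferred_key] = 0
def pvRankB (preferred_key : Option String) : PySem.Dict String Int :=
  match preferred_key with
  | some k =>
    if k == "" then PySem.Dict.mk [("data", 1), ("default", 2), ("asset", 3)]
    else (PySem.Dict.mk [("data", 1), ("default", 2), ("asset", 3)]).insert k 0
  | none => PySem.Dict.mk [("data", 1), ("default", 2), ("asset", 3)]

-- single scan: best_rank/best_href/first_href accumulator over assets.items()
def select_asset_href_py_alt (assets : List (String × String)) (preferred_key : Option String) : Option String :=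
  let rank := pvRankB preferred_key
  let st :=
    ((PySem.Dict.mk assets).items).foldl
      (fun (s : Int × Option String × Option String) p =>
        let fh := if s.2.2.isNone then some p.2 else s.2.2
        let r := rank.getD p.1 4
        if r < s.1 then (r, some p.2, fh) else (s.1, s.2.1, fh))
      (4, none, none)
  if st.1 < 4 then st.2.1 else st.2.2

-- ===== PRECONDITION & SPEC =====
def Spec_select_asset_href_py (assets : List (String × String)) (preferred_key : Option String) (out : Option String) : Prop := out = select_asset_href_py_alt assets preferred_key
instance (assets : List (String × String)) (preferred_key : Option String) (out : Option String) : Decidable (Spec_select_asset_href_py assets preferred_key out) := by unfold Spec_select_asset_href_py; infer_instance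

-- ===== CLAIM (what is proved, stated in full; the proofs are below) =====
def Claim_equal_select_asset_href_py : Prop := ∀ (assets : List (String × String)) (preferred_key : Option String), Dom_select_asset_href_py assets preferred_key → Spec_select_asset_href_py assets preferred_key (select_asset_href_py assets preferred_key)

-- ===== LEMMAS AND PROOFS =====

-- minimum rank accumulated by B's scan
def pvMinr (rank : PySem.Dict String Int) (xs : List (String × String)) (b : Int) : Int :=
  xs.foldl (fun a p => if rank.getD p.1 4 < a then rank.getD p.1 4 else a) b

-- the value B's conditional returns, as a function of the scan
def pvBval (rank : PySem.Dict String Int) (xs : List (String × String)) : Option String :=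
  if pvMinr rank xs 4 < 4 then
    (xs.find? (fun p => rank.getD p.1 4 == pvMinr rank xs 4)).map (·.2)
  else xs.head?.map (·.2)

lemma pvMinr_le_init (rank : PySem.Dict String Int) (xs : List (String × String)) :
    ∀ b : Int, pvMinr rank xs b ≤ b := by
  induction xs with
  | nil => intro b; simp [pvMinr]
  | cons p l ih =>
    intro b
    have h := ih (if rank.getD p.1 4 < b then rank.getD p.1 4 else b)
    simp only [pvMinr, List.foldl_cons] at h ⊢
    split_ifs at h ⊢ with hr
    · exact le_trans h (le_of_lt hr)
    · exact h

lemma pvMinr_le_of_mem (rank : PySem.Dict String Int) (xs : List (String × String)) :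
    ∀ (b : Int) (q : String × String), q ∈ xs → pvMinr rank xs b ≤ rank.getD q.1 4 := by
  induction xs with
  | nil => intro b q hq; simp at hq
  | cons p l ih =>
    intro b q hq
    simp only [pvMinr, List.foldl_cons]
    rcases List.mem_cons.mp hq with rfl | hmem
    · by_cases hr : rank.getD q.1 4 < b
      · simp only [hr, if_pos]
        exact pvMinr_le_init rank l _
      · simp only [hr, if_false]
        exact le_trans (pvMinr_le_init rank l b) (not_lt.mp hr)
    · exact ih _ q hmem

lemma pv_le_minr (rank : PySem.Dict String Int) (xs : List (String × String)) :
    ∀ (b c : Int), (∀ q ∈ xs, c ≤ rank.getD q.1 4) → c ≤ b → c ≤ pvMinr rank xs b := by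
  induction xs with
  | nil => intro b c _ hb; simpa [pvMinr] using hb
  | cons p l ih =>
    intro b c h hb
    simp only [pvMinr, List.foldl_cons]
    refine ih _ c (fun q hq => h q (List.mem_cons_of_mem _ hq)) ?_
    by_cases hr : rank.getD p.1 4 < b
    · simpa [hr] using h p (List.mem_cons_self)
    · simpa [hr] using hb

-- B's scan step, named so the fold characterization can be stated once
def pvStep (rank : PySem.Dict String Int) (s : Int × Option String × Option String)
    (p : String × String) : Int × Option String × Option String :=
  if rank.getD p.1 4 < s.1 then (rank.getD p.1 4, some p.2, if s.2.2.isNone then some p.2 else s.2.2)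
  else (s.1, s.2.1, if s.2.2.isNone then some p.2 else s.2.2)

-- characterization of B's fold: min rank, href at the first minimal-rank item, and the first href
lemma pvFold_char (rank : PySem.Dict String Int) (xs : List (String × String)) :
    ∀ (b : Int) (bh fh : Option String),
      xs.foldl (pvStep rank) (b, bh, fh)
      = (pvMinr rank xs b,
         if pvMinr rank xs b < b then (xs.find? (fun p => rank.getD p.1 4 == pvMinr rank xs b)).map (·.2) else bh,
         if fh.isNone then xs.head?.map (·.2) else fh) := by
  induction xs with
  | nil =>
    intro b bh fh
    cases fh <;> simp [pvMinr]
  | cons p l ih =>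
    intro b bh fh
    simp only [List.foldl_cons]
    by_cases hr : rank.getD p.1 4 < b
    · have hm : pvMinr rank (p :: l) b = pvMinr rank l (rank.getD p.1 4) := by
        simp [pvMinr, hr]
      rw [show pvStep rank (b, bh, fh) p
          = (rank.getD p.1 4, some p.2, if fh.isNone then some p.2 else fh) by
        simp [pvStep, hr]]
      rw [ih]
      have hle : pvMinr rank l (rank.getD p.1 4) ≤ rank.getD p.1 4 := pvMinr_le_init rank l _
      by_cases hlt : pvMinr rank l (rank.getD p.1 4) < rank.getD p.1 4
      · have hlt' : pvMinr rank (p :: l) b < b := by rw [hm]; exact lt_trans hlt hr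
        have hne : (rank.getD p.1 4 == pvMinr rank (p :: l) b) = false := by
          rw [hm]; simp; omega
        refine Prod.ext ?_ (Prod.ext ?_ ?_) <;> simp only
        · exact hm.symm
        · have h1 : pvMinr rank l (rank.getD p.1 4) < b := hm ▸ hlt'
          have h2 : (rank.getD p.1 4 == pvMinr rank l (rank.getD p.1 4)) = false := by
            simp; omega
          rw [if_pos hlt, hm, if_pos h1, List.find?_cons]
          simp only [h2]
        · cases fh <;> simp
      · have heq : pvMinr rank (p :: l) b = rank.getD p.1 4 := by
          rw [hm]; omega
        have hlt' : pvMinr rank (p :: l) b < b := by rw [heq]; exact hr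
        refine Prod.ext ?_ (Prod.ext ?_ ?_) <;> simp only
        · exact hm.symm
        · have h3 : pvMinr rank l (rank.getD p.1 4) = rank.getD p.1 4 := by omega
          have h1 : pvMinr rank l (rank.getD p.1 4) < b := by omega
          have h2 : (rank.getD p.1 4 == pvMinr rank l (rank.getD p.1 4)) = true := by
            simp [h3]
          rw [if_neg hlt, hm, if_pos h1, List.find?_cons]
          simp [h2]
        · cases fh <;> simp
    · have hm : pvMinr rank (p :: l) b = pvMinr rank l b := by
        simp [pvMinr, hr]
      rw [show pvStep rank (b, bh, fh) p
          = (b, bh, if fh.isNone then some p.2 else fh) by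
        simp [pvStep, hr]]
      rw [ih]
      refine Prod.ext ?_ (Prod.ext ?_ ?_) <;> simp only
      · exact hm.symm
      · by_cases hlt : pvMinr rank l b < b
        · have h2 : (rank.getD p.1 4 == pvMinr rank l b) = false := by
            simp; omega
          rw [if_pos hlt, hm, if_pos hlt, List.find?_cons]
          simp only [h2]
        · rw [if_neg hlt, hm, if_neg hlt]
      · cases fh <;> simp

-- B as pvBval
lemma pvAlt_eq_Bval (assets : List (String × String)) (preferred_key : Option String) :
    select_asset_href_py_alt assets preferred_key = pvBval (pvRankB preferred_key) assets := by
  have hdef : select_asset_href_py_alt assets preferred_key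
      = (let st := assets.foldl (pvStep (pvRankB preferred_key)) (4, none, none)
         if st.1 < 4 then st.2.1 else st.2.2) := rfl
  rw [hdef]
  show (let st := assets.foldl (pvStep (pvRankB preferred_key)) (4, none, none)
        if st.1 < 4 then st.2.1 else st.2.2) = _
  rw [show assets.foldl (pvStep (pvRankB preferred_key)) (4, none, none)
      = _ from pvFold_char (pvRankB preferred_key) assets 4 none none]
  unfold pvBval
  by_cases h : pvMinr (pvRankB preferred_key) assets 4 < 4 <;> simp [h]

-- get? of a raw assoc list is first-match
lemma pv_get?_mk (xs : List (String × String)) (k : String) :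
    (PySem.Dict.mk xs).get? k = (xs.find? (fun q => q.1 == k)).map (·.2) := rfl

lemma pv_absent_of_get?_none (xs : List (String × String)) (k : String)
    (h : (PySem.Dict.mk xs).get? k = none) : ∀ q ∈ xs, q.1 ≠ k := by
  intro q hq
  rw [pv_get?_mk, Option.map_eq_none_iff, List.find?_eq_none] at h
  have := h q hq
  simpa using this

lemma pv_mem_of_get?_some (xs : List (String × String)) (k : String) (v : String)
    (h : (PySem.Dict.mk xs).get? k = some v) : ∃ q ∈ xs, q.1 = k := by
  rw [pv_get?_mk] at h
  rcases Option.map_eq_some_iff.mp h with ⟨q, hq, _⟩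
  exact ⟨q, List.mem_of_find?_eq_some hq, by simpa using List.find?_some hq⟩

lemma pv_find?_congr_mem {α : Type} (l : List α) (p q : α → Bool)
    (h : ∀ a ∈ l, p a = q a) : l.find? p = l.find? q := by
  induction l with
  | nil => rfl
  | cons x xs ih =>
    rw [List.find?_cons, List.find?_cons, h x List.mem_cons_self,
      ih (fun a ha => h a (List.mem_cons_of_mem _ ha))]

-- the winning case: the first-match lookup at the unique minimal-rank key is what the scan returns
lemma pv_select (rank : PySem.Dict String Int) (xs : List (String × String))
    (k0 v : String) (m : Int)
    (hg : (PySem.Dict.mk xs).get? k0 = some v)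
    (hm4 : m < 4)
    (hk : rank.getD k0 4 = m)
    (huniq : ∀ k, rank.getD k 4 = m → k = k0)
    (hlow : ∀ q ∈ xs, m ≤ rank.getD q.1 4) :
    pvBval rank xs = some v := by
  rcases pv_mem_of_get?_some xs k0 v hg with ⟨q0, hq0, hq0k⟩
  have hMle : pvMinr rank xs 4 ≤ m := by
    have := pvMinr_le_of_mem rank xs 4 q0 hq0
    rwa [hq0k, hk] at this
  have hMge : m ≤ pvMinr rank xs 4 := pv_le_minr rank xs 4 m hlow (le_of_lt hm4)
  have hM : pvMinr rank xs 4 = m := le_antisymm hMle hMge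
  unfold pvBval
  rw [hM, if_pos hm4]
  rw [pv_find?_congr_mem xs _ (fun q => q.1 == k0) ?_]
  · rw [← pv_get?_mk, hg]
  · intro a _
    by_cases ha : a.1 = k0
    · simp [ha, hk]
    · have : rank.getD a.1 4 ≠ m := fun h => ha (huniq _ h)
      simp [ha, this]

-- the losing case: no ranked key present, the scan returns the first href
lemma pv_lose (rank : PySem.Dict String Int) (xs : List (String × String))
    (hlow : ∀ q ∈ xs, 4 ≤ rank.getD q.1 4) :
    pvBval rank xs = xs.head?.map (·.2) := by
  have hMge : (4 : Int) ≤ pvMinr rank xs 4 := pv_le_minr rank xs 4 4 hlow le_rfl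
  unfold pvBval
  rw [if_neg (by omega)]

-- rank table of the base dict {"data":1,"default":2,"asset":3}
lemma pv_rk_base (k : String) :
    (PySem.Dict.mk [("data", (1 : Int)), ("default", 2), ("asset", 3)]).getD k 4
      = if k = "data" then 1 else if k = "default" then 2 else if k = "asset" then 3 else 4 := by
  by_cases h1 : k = "data"
  · subst h1; decide
  · by_cases h2 : k = "default"
    · subst h2; decide
    · by_cases h3 : k = "asset"
      · subst h3; decide
      · have b1 : ("data" == k) = false := beq_eq_false_iff_ne.mpr (fun h => h1 h.symm)
        have b2 : ("default" == k) = false := beq_eq_false_iff_ne.mpr (fun h => h2 h.symm)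
        have b3 : ("asset" == k) = false := beq_eq_false_iff_ne.mpr (fun h => h3 h.symm)
        rw [PySem.Dict.getD_eq_get?_getD, PySem.Dict.get?_mk_cons, PySem.Dict.get?_mk_cons,
          PySem.Dict.get?_mk_cons]
        simp [b1, b2, b3, h1, h2, h3, PySem.Dict.get?]

lemma pv_rk_ins (p k : String) :
    ((PySem.Dict.mk [("data", (1 : Int)), ("default", 2), ("asset", 3)]).insert p 0).getD k 4
      = if k = p then 0 else
          if k = "data" then 1 else if k = "default" then 2 else if k = "asset" then 3 else 4 := by
  rw [PySem.Dict.getD_insert]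
  by_cases h : k = p
  · simp [h]
  · simp [h, pv_rk_base]

-- the common-key chain of A equals B's scan, for either rank table, when no rank-0 key is present
lemma pv_chain (rank : PySem.Dict String Int) (xs : List (String × String))
    (h0 : ∀ q ∈ xs, 1 ≤ rank.getD q.1 4)
    (hd : rank.getD "data" 4 ≤ 1)
    (hdef : rank.getD "default" 4 ≤ 2)
    (hass : rank.getD "asset" 4 ≤ 3)
    (hu1 : ∀ k, rank.getD k 4 = 1 → k = "data")
    (hu2 : ∀ k, rank.getD k 4 = 2 → k = "default")
    (hu3 : ∀ k, rank.getD k 4 = 3 → k = "asset") :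
    pvCommonA xs ["data", "default", "asset"] = pvBval rank xs := by
  unfold pvCommonA
  cases hgd : (PySem.Dict.mk xs).get? "data" with
  | some v =>
    rcases pv_mem_of_get?_some xs _ v hgd with ⟨q, hq, hqk⟩
    have h1 : rank.getD "data" 4 = 1 := by
      have := h0 q hq; rw [hqk] at this; omega
    exact (pv_select rank xs "data" v 1 hgd (by omega) h1 hu1
      (fun q hq => h0 q hq)).symm
  | none =>
    unfold pvCommonA
    have hlow2 : ∀ q ∈ xs, 2 ≤ rank.getD q.1 4 := by
      intro q hq
      have hge := h0 q hq
      by_cases h : rank.getD q.1 4 = 1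
      · exact absurd (hu1 _ h) (fun hk => pv_absent_of_get?_none xs _ hgd q hq hk)
      · omega
    cases hgdef : (PySem.Dict.mk xs).get? "default" with
    | some v =>
      rcases pv_mem_of_get?_some xs _ v hgdef with ⟨q, hq, hqk⟩
      have h2 : rank.getD "default" 4 = 2 := by
        have := hlow2 q hq; rw [hqk] at this; omega
      exact (pv_select rank xs "default" v 2 hgdef (by omega) h2 hu2 hlow2).symm
    | none =>
      unfold pvCommonA
      have hlow3 : ∀ q ∈ xs, 3 ≤ rank.getD q.1 4 := by
        intro q hq
        have hge := hlow2 q hq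
        by_cases h : rank.getD q.1 4 = 2
        · exact absurd (hu2 _ h) (fun hk => pv_absent_of_get?_none xs _ hgdef q hq hk)
        · omega
      cases hga : (PySem.Dict.mk xs).get? "asset" with
      | some v =>
        rcases pv_mem_of_get?_some xs _ v hga with ⟨q, hq, hqk⟩
        have h3 : rank.getD "asset" 4 = 3 := by
          have := hlow3 q hq; rw [hqk] at this; omega
        exact (pv_select rank xs "asset" v 3 hga (by omega) h3 hu3 hlow3).symm
      | none =>
        unfold pvCommonA
        have hlow4 : ∀ q ∈ xs, 4 ≤ rank.getD q.1 4 := by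
          intro q hq
          have hge := hlow3 q hq
          by_cases h : rank.getD q.1 4 = 3
          · exact absurd (hu3 _ h) (fun hk => pv_absent_of_get?_none xs _ hga q hq hk)
          · omega
        rw [pv_lose rank xs hlow4]
        unfold pvFirstHrefA
        cases xs with
        | nil => rfl
        | cons p l => cases p; rfl

-- ===== VERDICT (by name: the statement is the Claim_ definition above) =====
theorem select_asset_href_py_spec : Claim_equal_select_asset_href_py := by
  intro assets pk _
  unfold Spec_select_asset_href_py
  rw [pvAlt_eq_Bval]
  by_cases hemp : assets.isEmpty
  · rcases List.isEmpty_iff.mp hemp with rfl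
    simp [select_asset_href_py, pvBval, pvMinr]
  · have base_chain :
        pvCommonA assets ["data", "default", "asset"]
          = pvBval (PySem.Dict.mk [("data", (1 : Int)), ("default", 2), ("asset", 3)]) assets := by
      refine pv_chain _ assets ?_ ?_ ?_ ?_ ?_ ?_ ?_ <;>
        first
        | (intro q _; rw [pv_rk_base]; split_ifs <;> omega)
        | decide
        | (intro k hk; rw [pv_rk_base] at hk; split_ifs at hk <;> first | assumption | omega)
    unfold select_asset_href_py
    rw [if_neg hemp]
    cases pk with
    | none => simpa [pvRankB] using base_chain
    | some p =>
      by_cases hp : p = ""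
      · subst hp
        simpa [pvRankB] using base_chain
      · have hpB : (p == "") = false := by simpa using hp
        rw [show pvRankB (some p)
            = (PySem.Dict.mk [("data", (1 : Int)), ("default", 2), ("asset", 3)]).insert p 0 by
          simp [pvRankB, hpB]]
        show (if (p != "" && ((PySem.Dict.mk assets).get? p).isSome) = true
              then (PySem.Dict.mk assets).get? p
              else pvCommonA assets ["data", "default", "asset"]) = _
        cases hgp : (PySem.Dict.mk assets).get? p with
        | some v =>
          rw [if_pos (by simp [hp] : (p != "" && (some v).isSome) = true)]
          refine (pv_select _ assets p v 0 hgp (by omega) ?_ ?_ ?_).symm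
          · exact PySem.Dict.getD_insert_self _ _ _ _
          · intro k hk
            rw [pv_rk_ins] at hk
            split_ifs at hk <;> first | assumption | omega
          · intro q _
            rw [pv_rk_ins]; split_ifs <;> omega
        | none =>
          rw [if_neg (by simp : ¬ (p != "" && (none : Option String).isSome) = true)]
          refine pv_chain _ assets ?_ ?_ ?_ ?_ ?_ ?_ ?_
          · intro q hq
            rw [pv_rk_ins]
            have hqne : q.1 ≠ p := pv_absent_of_get?_none assets p hgp q hq
            rw [if_neg hqne]
            split_ifs <;> omega
          · rw [pv_rk_ins]; split_ifs <;> first | omega | simp_all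
          · rw [pv_rk_ins]; split_ifs <;> first | omega | simp_all
          · rw [pv_rk_ins]; split_ifs <;> first | omega | simp_all
          · intro k hk
            rw [pv_rk_ins] at hk
            split_ifs at hk <;> first | assumption | omega
          · intro k hk
            rw [pv_rk_ins] at hk
            split_ifs at hk <;> first | assumption | omega
          · intro k hk
            rw [pv_rk_ins] at hk
            split_ifs at hk <;> first | assumption | omega
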